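-- pv_equiv track=rewrite | github.com/anushkachauhxn/rosalind-bioinformatics | 26-SSEQ.py | sortInput
-- ===== SOURCE A (Python) =====
-- def sortInput(lines):
--     def isIdString(str):
--         if (str.startswith(">")):
--             return True
--         return False
--
--     dna_strings = []
--     for i in range(0, len(lines)):
--         if (isIdString(lines[i])):
--             str = ""
--             for j in range(i+1, len(lines)):
--                 if (isIdString(lines[j])):
--                     break
--                 str += lines[j].strip()
--             dna_strings.append(str)
--     return dna_strings
-- ===== SOURCE B (Python) =====
-- def sortInput(lines):
--     dna_strings = []
--     current = None
--     for line in lines: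
--         if line.startswith(">"):
--             dna_strings.append("")
--             current = len(dna_strings) - 1
--         elif current is not None:
--             dna_strings[current] += line.strip()
--     return dna_strings
-- ===== Notes on version B (the rewrite author's own statement) =====
-- stated objective: simpler
-- what changed: Replaces the outer loop over id-line indices with an inner rescan of all following lines by a single forward pass that appends an empty entry at each id line and accumulates stripped lines into the current entry.
import Mathlib
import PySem

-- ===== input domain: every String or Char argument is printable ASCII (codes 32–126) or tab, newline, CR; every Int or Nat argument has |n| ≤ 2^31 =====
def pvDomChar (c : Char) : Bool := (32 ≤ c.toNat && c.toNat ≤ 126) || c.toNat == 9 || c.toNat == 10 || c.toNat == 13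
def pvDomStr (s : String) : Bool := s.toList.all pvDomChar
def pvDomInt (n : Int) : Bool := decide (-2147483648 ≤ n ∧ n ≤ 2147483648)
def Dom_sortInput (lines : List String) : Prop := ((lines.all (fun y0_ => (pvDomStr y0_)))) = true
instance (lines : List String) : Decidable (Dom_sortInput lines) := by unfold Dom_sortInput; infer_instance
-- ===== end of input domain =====

-- B replaces A's outer loop over id lines with an inner rescan by one forward
-- accumulator pass (simpler): same return value, stated in Claim_equal_sortInput.

-- ===== PORT A =====
-- helper isIdString of A
def pvIsId (s : String) : Bool := if PySem.Str.startswith s ">" then true else false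

-- inner 'for j in range(i+1, len(lines))' loop with break, state 'str'
def sortInputInner (lines : List String) (j : Nat) (s : String) : String :=
  if h : j < lines.length then
    if pvIsId lines[j] then s
    else sortInputInner lines (j + 1) (s ++ PySem.Str.strip lines[j])
  else s
termination_by lines.length - j

-- outer 'for i in range(0, len(lines))' loop, state 'dna_strings'
def sortInputGo (lines : List String) (i : Nat) (acc : List String) : List String :=
  if h : i < lines.length then
    if pvIsId lines[i] then sortInputGo lines (i + 1) (acc ++ [sortInputInner lines (i + 1) ""])
    else sortInputGo lines (i + 1) acc
  else acc
termination_by lines.length - i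

def sortInput (lines : List String) : List String := sortInputGo lines 0 []

-- ===== PORT B =====
-- one step of B's single pass: state = (dna_strings, current)
def sortInputAltStep (st : List String × Option Nat) (line : String) : List String × Option Nat :=
  if PySem.Str.startswith line ">" then (st.1 ++ [""], some ((st.1.length + 1) - 1))
  else
    match st.2 with
    | some i => (st.1.modify i (· ++ PySem.Str.strip line), st.2)
    | none => st

def sortInput_alt (lines : List String) : List String :=
  (lines.foldl sortInputAltStep ([], none)).1

-- ===== PRECONDITION & SPEC =====
def Spec_sortInput (lines : List String) (out : List String) : Prop := out = sortInput_alt lines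
instance (lines : List String) (out : List String) : Decidable (Spec_sortInput lines out) := by unfold Spec_sortInput; infer_instance

-- ===== CLAIM (what is proved, stated in full; the proofs are below) =====
def Claim_equal_sortInput : Prop := ∀ (lines : List String), Dom_sortInput lines → Spec_sortInput lines (sortInput lines)

-- ===== LEMMAS AND PROOFS =====

-- the stripped concatenation of the lines up to (exclusive) the next id line
def pvGroup : List String → String
  | [] => ""
  | l :: ls => if pvIsId l then "" else PySem.Str.strip l ++ pvGroup ls

-- one group per id line
def pvGroups : List String → List String
  | [] => []
  | l :: ls => if pvIsId l then pvGroup ls :: pvGroups ls else pvGroups ls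

theorem pvIsId_eq (l : String) : pvIsId l = PySem.Str.startswith l ">" := by
  unfold pvIsId; split <;> simp_all

theorem sortInputInner_eq (lines : List String) (j : Nat) (s : String) :
    sortInputInner lines j s = s ++ pvGroup (lines.drop j) := by
  by_cases h : j < lines.length
  · rw [List.drop_eq_getElem_cons h]
    rw [sortInputInner]
    simp only [h, dif_pos]
    by_cases hid : pvIsId lines[j]
    · simp [pvGroup, hid, String.append_empty]
    · rw [if_neg hid]
      rw [sortInputInner_eq lines (j + 1)]
      simp [pvGroup, hid, String.append_assoc]
  · rw [sortInputInner]
    simp [h, List.drop_eq_nil_of_le (Nat.le_of_not_lt h), pvGroup, String.append_empty]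
termination_by lines.length - j

theorem sortInputGo_eq (lines : List String) (i : Nat) (acc : List String) :
    sortInputGo lines i acc = acc ++ pvGroups (lines.drop i) := by
  by_cases h : i < lines.length
  · rw [sortInputGo]
    simp only [h, dif_pos]
    rw [List.drop_eq_getElem_cons h]
    by_cases hid : pvIsId lines[i]
    · rw [if_pos hid, sortInputGo_eq lines (i + 1)]
      simp [pvGroups, hid, sortInputInner_eq]
    · rw [if_neg hid, sortInputGo_eq lines (i + 1)]
      simp [pvGroups, hid]
  · rw [sortInputGo]
    simp [h, List.drop_eq_nil_of_le (Nat.le_of_not_lt h), pvGroups]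
termination_by lines.length - i

theorem modify_append_last (ds : List String) (s : String) (f : String → String) :
    (ds ++ [s]).modify ds.length f = ds ++ [f s] := by
  simp [List.modify_eq_set]

theorem foldl_step_some (ls : List String) (ds : List String) (s : String) :
    (ls.foldl sortInputAltStep (ds ++ [s], some ds.length)).1
      = ds ++ (s ++ pvGroup ls) :: pvGroups ls := by
  induction ls generalizing ds s with
  | nil => simp [pvGroup, pvGroups, String.append_empty]
  | cons l ls ih =>
    by_cases hid : pvIsId l
    · have hsw : PySem.Str.startswith l ">" = true := by rw [← pvIsId_eq]; exact hid
      simp only [List.foldl_cons, sortInputAltStep, hsw, if_pos]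
      rw [show (ds ++ [s]).length + 1 - 1 = (ds ++ [s]).length by omega]
      rw [ih (ds ++ [s]) ""]
      simp [pvGroup, pvGroups, hid, String.empty_append]
    · have hsw : PySem.Str.startswith l ">" = false := by
        rw [← pvIsId_eq]; exact Bool.eq_false_iff.mpr hid
      simp only [List.foldl_cons, sortInputAltStep, hsw, Bool.false_eq_true, if_false]
      rw [modify_append_last]
      rw [ih ds (s ++ PySem.Str.strip l)]
      simp [pvGroup, pvGroups, hid, String.append_assoc]

theorem foldl_step_none (ls : List String) (ds : List String) :
    (ls.foldl sortInputAltStep (ds, none)).1 = ds ++ pvGroups ls := by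
  induction ls generalizing ds with
  | nil => simp [pvGroups]
  | cons l ls ih =>
    by_cases hid : pvIsId l
    · have hsw : PySem.Str.startswith l ">" = true := by rw [← pvIsId_eq]; exact hid
      simp only [List.foldl_cons, sortInputAltStep, hsw, if_pos]
      rw [show ds.length + 1 - 1 = ds.length by omega]
      rw [foldl_step_some ls ds ""]
      simp [pvGroups, hid, String.empty_append]
    · have hsw : PySem.Str.startswith l ">" = false := by
        rw [← pvIsId_eq]; exact Bool.eq_false_iff.mpr hid
      simp only [List.foldl_cons, sortInputAltStep, hsw, Bool.false_eq_true, if_false]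
      rw [ih ds]
      simp [pvGroups, hid]

-- ===== VERDICT (by name: the statement is the Claim_ definition above) =====
theorem sortInput_spec : Claim_equal_sortInput := by
  intro lines _
  unfold Spec_sortInput sortInput sortInput_alt
  rw [sortInputGo_eq, foldl_step_none]
  simp
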